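-- pv_equiv track=rewrite | github.com/pabsan-0/learning-rl | random-walk/randomWalk.py | getReturn
-- ===== SOURCE A (Python) =====
-- def getReturn(history: list) -> list:
--     ''' Compute Gt backwards from a history.
--     Format:  [[state(t), reward(t+1)], [state[t+1], reward[t+2]]]
--     Example: ['c', 0], ['b', 0], ['a', 0]]
--     '''
--     # Placeholder, g is of undeterminate size
--     G = []
--
--     # Reverse history to start from the last state and go backwards in time
--     history.reverse()
--     for idx, (state, reward) in enumerate(history):
--         # First item considers that rewards after terminal state are 0
--         if idx == 0:
--             G.append(reward)
--         # Else apply Gt = Rt+1 + Gt+1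
--         else:
--             G.append(reward + G[-1])
--
--     # Reverse G & history so they flow parallel to time & return Gt
--     history.reverse()
--     G.reverse()
--     return G
-- ===== SOURCE B (Python) =====
-- def getReturn(history: list) -> list:
--     ''' Compute Gt forwards: G(t) is the total reward still to come, so start
--     from the grand total and subtract each reward as time moves forward. '''
--     acc = sum(reward for _, reward in history)
--     out = []
--     for state, reward in history:
--         out.append(acc)
--         acc -= reward
--     return out
-- ===== Notes on version B (the rewrite author's own statement) =====
-- stated objective: alternative
-- what changed: Replaces A's backward suffix-accumulation (two in-place reversals, enumerate with an idx==0 special case, reading G[-1]) by a forward algorithm: precompute the grand total of rewards, then one forward pass emitting the running remainder (total minus prefix), exact over integers.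
import Mathlib
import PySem

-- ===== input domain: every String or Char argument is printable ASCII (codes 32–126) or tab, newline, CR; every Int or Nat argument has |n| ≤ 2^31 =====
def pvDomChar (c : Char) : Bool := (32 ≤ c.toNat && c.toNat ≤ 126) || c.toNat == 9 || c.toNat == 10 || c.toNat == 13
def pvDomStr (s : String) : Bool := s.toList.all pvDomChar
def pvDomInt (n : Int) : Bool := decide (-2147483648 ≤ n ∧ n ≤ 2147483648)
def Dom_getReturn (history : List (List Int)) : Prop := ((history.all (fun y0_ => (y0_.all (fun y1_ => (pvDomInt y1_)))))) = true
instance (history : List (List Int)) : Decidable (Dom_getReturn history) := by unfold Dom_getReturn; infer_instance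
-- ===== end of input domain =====

-- B replaces A's backward suffix accumulation (double in-place reversal, idx==0 case,
-- G[-1]) by a forward pass: precompute the reward total, then emit the running
-- remainder while subtracting each reward; exact over integers.
-- A temporarily reverses `history` in place but restores it; B never mutates it.

-- ===== PORT A =====
-- for-loop over enumerate(reversed history): state = (idx, G); `reward` is row[1]
-- (Pre_ guarantees each row has length 2, so getD's default is never used).
def getReturn (history : List (List Int)) : List Int :=
  let step : (Nat × List Int) → List Int → (Nat × List Int) := fun (idx, G) row =>
    let reward := row.getD 1 0
    if idx = 0 then (idx + 1, G ++ [reward])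
    else (idx + 1, G ++ [reward + G.getLastD 0])
  ((history.reverse.foldl step (0, [])).2).reverse

-- ===== PORT B =====
-- acc = sum of rewards; one forward pass appending acc and then subtracting the reward.
def getReturn_alt (history : List (List Int)) : List Int :=
  let total := history.foldl (fun s row => s + row.getD 1 0) 0
  (history.foldl
    (fun (st : Int × List Int) row => (st.1 - row.getD 1 0, st.2 ++ [st.1]))
    (total, [])).2

-- ===== PRECONDITION & SPEC =====
-- Pre_ excludes rows whose length is not 2: Python's tuple unpacking raises ValueError there.
def Pre_getReturn (history : List (List Int)) : Prop :=
  ∀ row ∈ history, row.length = 2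
instance (history : List (List Int)) : Decidable (Pre_getReturn history) := by unfold Pre_getReturn; infer_instance
def pvWitness_getReturn : List (List Int) := [[3, 1], [2, 0], [1, 5]]
def Spec_getReturn (history : List (List Int)) (out : List Int) : Prop := out = getReturn_alt history
instance (history : List (List Int)) (out : List Int) : Decidable (Spec_getReturn history out) := by unfold Spec_getReturn; infer_instance

-- ===== CLAIM (what is proved, stated in full; the proofs are below) =====
def Claim_equal_getReturn : Prop := ∀ (history : List (List Int)), Dom_getReturn history → Pre_getReturn history → Spec_getReturn history (getReturn history)

-- ===== LEMMAS AND PROOFS =====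

-- the reward of a row, the reward total, and the suffix sums both sides compute
def rew (row : List Int) : Int := row.getD 1 0
def sumR (xs : List (List Int)) : Int := (xs.map rew).sum
def sfx : List (List Int) → List Int
  | [] => []
  | row :: t => (rew row + sumR t) :: sfx t

-- prefix sums (A's G while scanning the reversed history)
def psums : List (List Int) → Int → List Int
  | [], _ => []
  | row :: t, a => (a + rew row) :: psums t (a + rew row)

-- B's forward remainders
def bsums : List (List Int) → Int → List Int
  | [], _ => []
  | row :: t, c => c :: bsums t (c - rew row)

-- A's fold equals the plain running-sum fold (idx/G[-1] bookkeeping eliminated)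
theorem getReturn_fold_link (xs : List (List Int)) (idx : Nat) (G : List Int) (acc : Int)
    (h0 : idx = 0 ↔ G = []) (hl : G.getLastD 0 = acc) :
    (xs.foldl (fun (p : Nat × List Int) row =>
        let reward := row.getD 1 0
        if p.1 = 0 then (p.1 + 1, p.2 ++ [reward])
        else (p.1 + 1, p.2 ++ [reward + p.2.getLastD 0])) (idx, G)).2
    = (xs.foldl (fun (st : Int × List Int) row =>
        (st.1 + row.getD 1 0, st.2 ++ [st.1 + row.getD 1 0])) (acc, G)).2 := by
  induction xs generalizing idx G acc with
  | nil => simp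
  | cons row xs ih =>
    simp only [List.foldl_cons]
    by_cases hi : idx = 0
    · have hG : G = [] := (h0.mp hi)
      subst hG
      have hacc : acc = 0 := by simpa using hl.symm
      subst hacc
      rw [if_pos hi]
      simp only [Int.zero_add, List.nil_append]
      exact ih _ _ _ (by simp) (by simp)
    · have hG : G ≠ [] := fun h => hi (h0.mpr h)
      rw [if_neg hi, hl, Int.add_comm]
      exact ih _ _ _ (by simp) (by simp)

theorem accfold_psums (xs : List (List Int)) (a : Int) (L : List Int) :
    (xs.foldl (fun (st : Int × List Int) row =>
        (st.1 + row.getD 1 0, st.2 ++ [st.1 + row.getD 1 0])) (a, L)).2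
    = L ++ psums xs a := by
  induction xs generalizing a L with
  | nil => simp [psums]
  | cons row t ih =>
    rw [List.foldl_cons, ih, psums]
    simp only [rew, List.append_assoc, List.singleton_append]

theorem psums_append (u v : List (List Int)) (a : Int) :
    psums (u ++ v) a = psums u a ++ psums v (a + sumR u) := by
  induction u generalizing a with
  | nil => simp [psums, sumR]
  | cons x u ih =>
    simp only [List.cons_append, psums, ih, sumR, List.map_cons, List.sum_cons]
    rw [Int.add_assoc]

theorem psums_reverse_sfx (ys : List (List Int)) :
    (psums ys.reverse 0).reverse = sfx ys := by
  induction ys with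
  | nil => simp [psums, sfx]
  | cons row t ih =>
    rw [sfx, ← ih, List.reverse_cons, psums_append]
    simp only [psums, sumR, List.map_reverse, List.sum_reverse, List.reverse_append,
      List.reverse_cons, List.reverse_nil, List.nil_append, List.singleton_append]
    rw [Int.zero_add, Int.add_comm]

theorem subfold_bsums (xs : List (List Int)) (c : Int) (L : List Int) :
    (xs.foldl (fun (st : Int × List Int) row =>
        (st.1 - row.getD 1 0, st.2 ++ [st.1])) (c, L)).2
    = L ++ bsums xs c := by
  induction xs generalizing c L with
  | nil => simp [bsums]
  | cons row t ih =>
    rw [List.foldl_cons, ih, bsums]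
    simp only [rew, List.append_assoc, List.singleton_append]

theorem bsums_sfx (xs : List (List Int)) : bsums xs (sumR xs) = sfx xs := by
  induction xs with
  | nil => simp [bsums, sfx]
  | cons row t ih =>
    have h1 : sumR (row :: t) = rew row + sumR t := by simp [sumR]
    have h2 : rew row + sumR t - rew row = sumR t := by ring
    rw [bsums, sfx, h1, h2, ih]

theorem total_eq_sumR (xs : List (List Int)) (a : Int) :
    xs.foldl (fun s row => s + row.getD 1 0) a = a + sumR xs := by
  induction xs generalizing a with
  | nil => simp [sumR]
  | cons row t ih =>
    rw [List.foldl_cons, ih]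
    simp only [sumR, rew, List.map_cons, List.sum_cons]
    ring

-- ===== VERDICT (by name: the statement is the Claim_ definition above) =====
theorem getReturn_spec : Claim_equal_getReturn := by
  intro history _ _
  unfold Spec_getReturn getReturn getReturn_alt
  simp only []
  rw [getReturn_fold_link history.reverse 0 [] 0 (by simp) (by simp),
      accfold_psums, List.nil_append, psums_reverse_sfx,
      total_eq_sumR, Int.zero_add, subfold_bsums, List.nil_append, bsums_sfx]
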